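-- pv_equiv track=rewrite | github.com/Charlie839242/my-code-for-full-speed-python | my-code/Chapter 10/10.1.py | even
-- ===== SOURCE A (Python) =====
-- def even(a,b):
--     if(a > b):
--         StopIteration
--     while(a <= b):
--         if(a % 2 == 0):
--             yield a
--             a = a + 2
--         else:
--             a = a + 1
-- ===== SOURCE B (Python) =====
-- def even(a, b):
--     # map the problem to half-space: evens of [a,b] are 2*k for k in [ceil(a/2), b//2]
--     for k in range(-(-a // 2), b // 2 + 1):
--         yield 2 * k
-- ===== Notes on version B (the rewrite author's own statement) =====
-- stated objective: alternative
-- what changed: B reduces the problem to half-space: it computes the bounds ceil(a/2) and b//2 by integer division and yields 2*k for each k in that unit-step range, with no parity testing and no traversal of [a,b] itself.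
import Mathlib
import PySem

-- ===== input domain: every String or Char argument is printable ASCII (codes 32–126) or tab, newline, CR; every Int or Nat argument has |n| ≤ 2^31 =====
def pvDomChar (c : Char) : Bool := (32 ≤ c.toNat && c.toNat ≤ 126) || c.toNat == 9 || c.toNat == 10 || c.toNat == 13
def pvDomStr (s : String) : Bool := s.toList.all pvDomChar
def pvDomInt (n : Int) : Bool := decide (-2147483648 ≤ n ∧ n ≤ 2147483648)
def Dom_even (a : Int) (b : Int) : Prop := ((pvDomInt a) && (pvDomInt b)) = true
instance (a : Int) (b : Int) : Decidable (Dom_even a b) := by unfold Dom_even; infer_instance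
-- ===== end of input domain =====

-- B maps the problem to half-space (yields 2*k for k in [ceil(a/2), b//2]) instead of A's
-- parity-tested scan of [a,b]; equal yielded sequence, objective: alternative algorithm.

-- ===== PORT A =====
-- while a <= b: if a % 2 == 0: yield a; a += 2 else: a += 1
def even (a : Int) (b : Int) : List Int :=
  if a ≤ b then
    if PySem.Int.mod a 2 = 0 then a :: even (a + 2) b
    else even (a + 1) b
  else []
termination_by (b + 1 - a).toNat
decreasing_by all_goals omega

-- ===== PORT B =====
-- for k in range(-(-a // 2), b // 2 + 1): yield 2 * k
def even_alt (a : Int) (b : Int) : List Int :=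
  (PySem.List.pyRange (-(PySem.Int.floordiv (-a) 2)) (PySem.Int.floordiv b 2 + 1) 1).map
    (fun k => 2 * k)

-- ===== PRECONDITION & SPEC =====
def Spec_even (a : Int) (b : Int) (out : List Int) : Prop := out = even_alt a b
instance (a : Int) (b : Int) (out : List Int) : Decidable (Spec_even a b out) := by unfold Spec_even; infer_instance

-- ===== CLAIM (what is proved, stated in full; the proofs are below) =====
def Claim_equal_even : Prop := ∀ (a : Int) (b : Int), Dom_even a b → Spec_even a b (even a b)

-- ===== LEMMAS AND PROOFS =====

-- floor division by 2 characterised for omega: q = x // 2 ↔ 2q ≤ x < 2q+2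
theorem fdiv2_iff (x q : Int) : PySem.Int.floordiv x 2 = q ↔ q * 2 ≤ x ∧ x < (q + 1) * 2 :=
  PySem.Int.floordiv_eq_iff_of_pos (by norm_num)

theorem mod2_zero_iff (x : Int) : PySem.Int.mod x 2 = 0 ↔ 2 ∣ x :=
  PySem.Int.mod_eq_zero_iff_dvd x 2

theorem even_eq_alt (a b : Int) : even a b = even_alt a b := by
  fun_induction even a b with
  | case1 a hle hmod ih =>
    -- a ≤ b, a even: ceil(a/2) = a/2 and a/2 ≤ b//2, so the range is a/2 :: …
    rw [ih]
    obtain ⟨m, rfl⟩ := (mod2_zero_iff a).mp hmod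
    unfold even_alt
    have h1 : -(PySem.Int.floordiv (-(2 * m)) 2) = m := by
      have := (fdiv2_iff (-(2 * m)) (-m)).mpr (by omega); omega
    have h2 : -(PySem.Int.floordiv (-(2 * m + 2)) 2) = m + 1 := by
      have := (fdiv2_iff (-(2 * m + 2)) (-(m + 1))).mpr (by omega); omega
    have hb := (fdiv2_iff b (PySem.Int.floordiv b 2)).mp rfl
    set q := PySem.Int.floordiv b 2 with hqdef
    rw [h1, h2,
      show PySem.List.pyRange m (q + 1) = m :: PySem.List.pyRange (m + 1) (q + 1) from
        PySem.List.pyRange_one_cons (by omega)]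
    simp
  | case2 a hle hmod ih =>
    -- a ≤ b, a odd: ceil(a/2) = ceil((a+1)/2), same range
    rw [ih]
    obtain ⟨m, rfl⟩ : ∃ m, a = 2 * m + 1 := by
      have h2 := PySem.Int.mod_two_eq a
      rcases h2 with h | h
      · exact absurd h hmod
      · have := PySem.Int.floordiv_mul_add_mod a 2
        exact ⟨PySem.Int.floordiv a 2, by omega⟩
    unfold even_alt
    have h1 : -(PySem.Int.floordiv (-(2 * m + 1)) 2) = m + 1 := by
      have := (fdiv2_iff (-(2 * m + 1)) (-(m + 1))).mpr (by omega); omega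
    have h2 : -(PySem.Int.floordiv (-(2 * m + 1 + 1)) 2) = m + 1 := by
      have := (fdiv2_iff (-(2 * m + 1 + 1)) (-(m + 1))).mpr (by omega); omega
    rw [h1, h2]
  | case3 a hgt =>
    -- a > b: ceil(a/2) > b//2, empty range
    unfold even_alt
    have hc := (fdiv2_iff (-a) (PySem.Int.floordiv (-a) 2)).mp rfl
    have hb := (fdiv2_iff b (PySem.Int.floordiv b 2)).mp rfl
    rw [PySem.List.pyRange_one_eq_nil (by omega)]
    simp

-- ===== VERDICT (by name: the statement is the Claim_ definition above) =====
theorem even_spec : Claim_equal_even := by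
  intro a b _
  unfold Spec_even
  exact even_eq_alt a b
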